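-- pv_equiv track=rewrite | github.com/RitamSaha001/lalacore-omega | latex_sanitizer.py | _has_nested_math_delimiters
-- ===== SOURCE A (Python) =====
-- def _has_nested_math_delimiters(text: str) -> bool:
--     """
--     Reject obvious delimiter nesting patterns like '$...$$...$'.
--     """
--     in_inline = False
--     in_block = False
--     i = 0
--     while i < len(text):
--         ch = text[i]
--         if ch == "\\":
--             i += 2
--             continue
--         if ch != "$":
--             i += 1
--             continue
--         is_block = i + 1 < len(text) and text[i + 1] == "$"
--         if is_block:
--             if in_inline:
--                 return True
--             in_block = not in_block
--             i += 2
--             continue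
--         if in_block:
--             return True
--         in_inline = not in_inline
--         i += 1
--     return in_inline or in_block
-- ===== SOURCE B (Python) =====
-- def _has_nested_math_delimiters(text: str) -> bool:
--     # Two passes: lex the string into inline/block '$' tokens, then count parities.
--     tokens = []
--     i, n = 0, len(text)
--     while i < n:
--         c = text[i]
--         if c == "\\":
--             i += 2
--         elif c != "$":
--             i += 1
--         elif i + 1 < n and text[i + 1] == "$":
--             tokens.append(True)   # block delimiter '$$'
--             i += 2
--         else:
--             tokens.append(False)  # inline delimiter '$'
--             i += 1
--     inl = blk = 0
--     for is_block in tokens: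
--         if is_block:
--             if inl % 2 == 1:
--                 return True
--             blk += 1
--         else:
--             if blk % 2 == 1:
--                 return True
--             inl += 1
--     return inl % 2 == 1 or blk % 2 == 1
-- ===== Notes on version B (the rewrite author's own statement) =====
-- stated objective: alternative
-- what changed: B separates scanning from the nesting decision: a first lexing pass turns the raw string into a list of inline/block delimiter tokens, and a second pass over that token list decides nesting by counting delimiter parities with integer counters instead of toggling booleans inline.
import Mathlib
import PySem

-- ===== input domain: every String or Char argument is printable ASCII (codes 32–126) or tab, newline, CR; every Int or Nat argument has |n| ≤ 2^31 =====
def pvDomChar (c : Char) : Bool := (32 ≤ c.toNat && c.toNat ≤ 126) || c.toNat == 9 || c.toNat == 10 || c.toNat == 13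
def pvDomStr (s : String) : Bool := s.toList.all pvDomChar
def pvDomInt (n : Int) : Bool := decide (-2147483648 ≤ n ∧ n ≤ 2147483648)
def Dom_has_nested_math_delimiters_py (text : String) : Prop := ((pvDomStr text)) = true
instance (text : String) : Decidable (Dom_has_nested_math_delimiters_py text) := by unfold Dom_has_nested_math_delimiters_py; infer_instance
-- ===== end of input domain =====

-- B separates scanning from the nesting decision: a lexing pass producing delimiter tokens, then a parity-counting pass over the token list (alternative decomposition, same cost).

-- ===== PORT A =====
-- A's while-loop over the index i, as structural recursion on the remaining characters;
-- 'i += 2' is dropping one extra character (exact: stepping past the end ends the loop),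
-- and 'i + 1 < len(text) and text[i+1] == "$"' is 'rest.head? = some '$''.
def pvLoopA : List Char → Bool → Bool → Bool
  | [], in_inline, in_block => in_inline || in_block
  | c :: rest, in_inline, in_block =>
    if c = '\\' then pvLoopA (rest.drop 1) in_inline in_block
    else if c ≠ '$' then pvLoopA rest in_inline in_block
    else if rest.head? = some '$' then
      if in_inline then true else pvLoopA rest.tail in_inline (!in_block)
    else
      if in_block then true else pvLoopA rest (!in_inline) in_block
  termination_by l _ _ => l.length
  decreasing_by all_goals (simp; try omega)

def has_nested_math_delimiters_py (text : String) : Bool :=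
  pvLoopA text.toList false false

-- ===== PORT B =====
-- pass 1 of Source B: lex the raw characters into delimiter tokens (true = block '$$', false = inline '$')
def pvLexB : List Char → List Bool
  | [] => []
  | c :: rest =>
    if c = '\\' then pvLexB (rest.drop 1)
    else if c ≠ '$' then pvLexB rest
    else if rest.head? = some '$' then true :: pvLexB rest.tail
    else false :: pvLexB rest
  termination_by l => l.length
  decreasing_by all_goals (simp; try omega)

-- pass 2 of Source B: integer parity counters over the token list
def pvRunB : List Bool → Int → Int → Bool
  | [], inl, blk => (PySem.Int.mod inl 2 == 1) || (PySem.Int.mod blk 2 == 1)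
  | t :: ts, inl, blk =>
    if t then
      if PySem.Int.mod inl 2 == 1 then true else pvRunB ts inl (blk + 1)
    else
      if PySem.Int.mod blk 2 == 1 then true else pvRunB ts (inl + 1) blk

def has_nested_math_delimiters_py_alt (text : String) : Bool :=
  pvRunB (pvLexB text.toList) 0 0

-- ===== PRECONDITION & SPEC =====
def Spec_has_nested_math_delimiters_py (text : String) (out : Bool) : Prop := out = has_nested_math_delimiters_py_alt text
instance (text : String) (out : Bool) : Decidable (Spec_has_nested_math_delimiters_py text out) := by unfold Spec_has_nested_math_delimiters_py; infer_instance

-- ===== CLAIM (what is proved, stated in full; the proofs are below) =====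
def Claim_equal_has_nested_math_delimiters_py : Prop := ∀ (text : String), Dom_has_nested_math_delimiters_py text → Spec_has_nested_math_delimiters_py text (has_nested_math_delimiters_py text)

-- ===== LEMMAS AND PROOFS =====

lemma pv_mod2 (n : Int) : PySem.Int.mod n 2 = n % 2 :=
  PySem.Int.mod_eq_emod_of_pos (by omega)

lemma pv_parity_succ (n : Int) :
    (PySem.Int.mod (n + 1) 2 == 1) = !(PySem.Int.mod n 2 == 1) := by
  rw [pv_mod2, pv_mod2]
  rcases Int.emod_two_eq_zero_or_one n with h | h
  · have h1 : (n + 1) % 2 = 1 := by omega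
    simp [h, h1]
  · have h1 : (n + 1) % 2 = 0 := by omega
    simp [h, h1]

-- A's single toggling pass equals B's counting pass run on the lexed token list,
-- with the booleans tracking the parities of the counters.
lemma pv_key (l : List Char) : ∀ (inl blk : Int),
    pvLoopA l (PySem.Int.mod inl 2 == 1) (PySem.Int.mod blk 2 == 1) = pvRunB (pvLexB l) inl blk := by
  induction l using pvLexB.induct with
  | case1 => intro inl blk; simp [pvLoopA, pvLexB, pvRunB]
  | case2 rest ih =>
    intro inl blk
    simp only [pvLoopA, pvLexB]
    exact ih inl blk
  | case3 c rest hne hd ih =>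
    intro inl blk
    simp only [pvLoopA, pvLexB, if_neg hne, if_pos hd]
    exact ih inl blk
  | case4 c rest hne hd hh ih =>
    intro inl blk
    by_cases hi : (PySem.Int.mod inl 2 == 1) = true
    · have hi' : decide (inl % 2 = 1) = true := by rw [pv_mod2] at hi; simpa using hi
      simp [pvLoopA, pvLexB, pvRunB, hne, hd, hh, hi']
    · simp only [Bool.not_eq_true] at hi
      simp only [pvLoopA, pvLexB, pvRunB, if_neg hne, if_neg hd, if_pos hh, hi,
        Bool.false_eq_true, if_false, if_true]
      rw [← pv_parity_succ blk]
      rw [pv_mod2] at hi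
      simpa [hi] using ih inl (blk + 1)
  | case5 c rest hne hd hh ih =>
    intro inl blk
    by_cases hb : (PySem.Int.mod blk 2 == 1) = true
    · have hb' : decide (blk % 2 = 1) = true := by rw [pv_mod2] at hb; simpa using hb
      simp [pvLoopA, pvLexB, pvRunB, hne, hd, hh, hb']
    · simp only [Bool.not_eq_true] at hb
      simp only [pvLoopA, pvLexB, pvRunB, if_neg hne, if_neg hd, if_neg hh, hb,
        Bool.false_eq_true, if_false]
      rw [← pv_parity_succ inl]
      rw [pv_mod2] at hb
      simpa [hb] using ih (inl + 1) blk

-- ===== VERDICT (by name: the statement is the Claim_ definition above) =====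
theorem has_nested_math_delimiters_py_spec : Claim_equal_has_nested_math_delimiters_py := by
  intro text _
  unfold Spec_has_nested_math_delimiters_py has_nested_math_delimiters_py has_nested_math_delimiters_py_alt
  simpa using pv_key text.toList 0 0
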